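-- pv_equiv track=rewrite | github.com/akadjoker/BuGLEs | scripts/tests/benchmark_hotspots.py | bench_multi_return_unpack
-- ===== SOURCE A (Python) =====
-- def pair(x):
--     return x, x + 1
--
-- def bench_multi_return_unpack(n):
--     s = 0
--     i = 0
--     while i < n:
--         a, b = pair(i)
--         s = s + a + b
--         i = i + 1
--     return s
-- ===== SOURCE B (Python) =====
-- def bench_multi_return_unpack(n):
--     # closed form: sum_{i=0}^{n-1} (i + (i+1)) = n^2
--     return n * n if n > 0 else 0
-- ===== Notes on version B (the rewrite author's own statement) =====
-- stated objective: faster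
-- what changed: Replaces the while-loop accumulation of i + (i+1) with the closed form n*n (0 for n <= 0).
import Mathlib
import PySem

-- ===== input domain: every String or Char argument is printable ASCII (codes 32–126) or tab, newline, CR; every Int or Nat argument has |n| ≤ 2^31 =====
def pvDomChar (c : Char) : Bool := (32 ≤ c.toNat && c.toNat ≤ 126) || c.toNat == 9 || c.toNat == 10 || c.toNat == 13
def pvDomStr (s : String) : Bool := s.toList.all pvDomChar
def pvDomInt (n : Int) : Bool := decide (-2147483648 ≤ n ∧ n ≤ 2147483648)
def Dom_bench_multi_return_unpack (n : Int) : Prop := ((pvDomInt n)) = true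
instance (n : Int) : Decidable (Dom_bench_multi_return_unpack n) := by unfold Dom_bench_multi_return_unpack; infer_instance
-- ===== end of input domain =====

-- B replaces A's O(n) while-loop sum of i + (i+1) with the closed form n*n (0 for n ≤ 0): asymptotically faster.


-- ===== PORT A =====
-- helper 'pair' from the Python module
def pairA (x : Int) : Int × Int := (x, x + 1)

-- the while loop: state (s, i), runs while i < n
def benchLoopA (n : Int) (s : Int) (i : Int) : Int :=
  if _h : i < n then
    let ab := pairA i
    benchLoopA n (s + ab.1 + ab.2) (i + 1)
  else s
termination_by (n - i).toNat
decreasing_by omega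

def bench_multi_return_unpack (n : Int) : Int := benchLoopA n 0 0

-- ===== PORT B =====
def bench_multi_return_unpack_alt (n : Int) : Int := if n > 0 then n * n else 0

-- ===== PRECONDITION & SPEC =====
def Spec_bench_multi_return_unpack (n : Int) (out : Int) : Prop := out = bench_multi_return_unpack_alt n
instance (n : Int) (out : Int) : Decidable (Spec_bench_multi_return_unpack n out) := by unfold Spec_bench_multi_return_unpack; infer_instance

-- ===== CLAIM (what is proved, stated in full; the proofs are below) =====
def Claim_equal_bench_multi_return_unpack : Prop := ∀ (n : Int), Dom_bench_multi_return_unpack n → Spec_bench_multi_return_unpack n (bench_multi_return_unpack n)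

-- ===== LEMMAS AND PROOFS =====

-- loop invariant: from state (s, i) with i ≤ n the loop returns s + n² − i²
theorem benchLoopA_eq (n s i : Int) (h : i ≤ n) :
    benchLoopA n s i = s + n * n - i * i := by
  rw [benchLoopA]
  split_ifs with hlt
  · simp only [pairA]
    rw [benchLoopA_eq n (s + i + (i + 1)) (i + 1) (by omega)]
    ring
  · have : i = n := by omega
    subst this; ring
termination_by (n - i).toNat
decreasing_by omega

-- ===== VERDICT (by name: the statement is the Claim_ definition above) =====
theorem bench_multi_return_unpack_spec : Claim_equal_bench_multi_return_unpack := by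
  intro n _
  unfold Spec_bench_multi_return_unpack bench_multi_return_unpack bench_multi_return_unpack_alt
  by_cases h : 0 < n
  · rw [benchLoopA_eq n 0 0 (by omega)]
    simp [h]
  · rw [benchLoopA]
    simp [h]
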